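-- pv_equiv track=rewrite | github.com/openeuler-mirror/aops-apollo | apollo/database/proxy/task/cve_fix.py | _gen_host_package_map
-- ===== SOURCE A (Python) =====
-- def _gen_host_package_map(patch_fix_rpms, fix_way) -> dict:
--     """
--     Args:
--         patch_fix_rpms: e.g
--             {
--                 "installed_rpm": "kernel-4.19",,
--                 "available_rpm": "kernel-5.1",
--                 "fix_way": "coldpatch/hotpatch"
--                 "cve_id": "CVE-2023-123"
--             }
--
--     Returns:
--         {
--             1: {
--                 "cves": "CVE-2023-123,CVE-2023-2345",
--                 "available_rpm": "kernel-5.1",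
--                 "installed_rpm": "kernel-4.19",
--                 "fix_way": "coldpatch/hotpatch"
--             }
--         }
--     """
--     fix_task_info_dict = dict()
--     for host_id, wait_fix_rpm in patch_fix_rpms.items():
--         cve_rpm_dict = dict()
--         for rpm in wait_fix_rpm:
--             if rpm["installed_rpm"] not in cve_rpm_dict:
--                 cve_rpm_dict[rpm["installed_rpm"]] = dict(rpm=[], cve=[])
--             cve_rpm_dict[rpm["installed_rpm"]]["rpm"].append(rpm["available_rpm"])
--             cve_rpm_dict[rpm["installed_rpm"]]["cve"].append(rpm["cve_id"])
--         fix_task_info_dict[host_id] = []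
--         for installed_rpm, cve_rpm_map_info in cve_rpm_dict.items():
--             available_rpm = sorted(cve_rpm_map_info["rpm"])[-1]
--             cves = ",".join(sorted(set(cve_rpm_map_info["cve"])))
--             fix_task_info_dict[host_id].append(
--                 {"cves": cves, "available_rpm": available_rpm, "installed_rpm": installed_rpm, "fix_way": fix_way}
--             )
--     return fix_task_info_dict
-- ===== SOURCE B (Python) =====
-- def _gen_host_package_map(patch_fix_rpms, fix_way) -> dict:
--     result = {}
--     for host_id, wait_fix_rpm in patch_fix_rpms.items():
--         # one pass: installed_rpm -> [running max available_rpm, set of cve ids]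
--         agg = {}
--         for rpm in wait_fix_rpm:
--             installed = rpm["installed_rpm"]
--             if installed in agg:
--                 entry = agg[installed]
--                 entry[0] = max(entry[0], rpm["available_rpm"])
--                 entry[1].add(rpm["cve_id"])
--             else:
--                 agg[installed] = [rpm["available_rpm"], {rpm["cve_id"]}]
--         result[host_id] = [
--             {"cves": ",".join(sorted(cves)), "available_rpm": max_rpm,
--              "installed_rpm": installed, "fix_way": fix_way}
--             for installed, (max_rpm, cves) in agg.items()
--         ]
--     return result
-- ===== Notes on version B (the rewrite author's own statement) =====
-- stated objective: simpler
-- what changed: Fuses A's two phases per host (collect lists of rpms/cves per installed_rpm, then reduce each group with sorted()[-1] and sorted(set(...))) into one pass that maintains only a running max available_rpm and a cve set per installed_rpm, emitting directly from that aggregate.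
import Mathlib
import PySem

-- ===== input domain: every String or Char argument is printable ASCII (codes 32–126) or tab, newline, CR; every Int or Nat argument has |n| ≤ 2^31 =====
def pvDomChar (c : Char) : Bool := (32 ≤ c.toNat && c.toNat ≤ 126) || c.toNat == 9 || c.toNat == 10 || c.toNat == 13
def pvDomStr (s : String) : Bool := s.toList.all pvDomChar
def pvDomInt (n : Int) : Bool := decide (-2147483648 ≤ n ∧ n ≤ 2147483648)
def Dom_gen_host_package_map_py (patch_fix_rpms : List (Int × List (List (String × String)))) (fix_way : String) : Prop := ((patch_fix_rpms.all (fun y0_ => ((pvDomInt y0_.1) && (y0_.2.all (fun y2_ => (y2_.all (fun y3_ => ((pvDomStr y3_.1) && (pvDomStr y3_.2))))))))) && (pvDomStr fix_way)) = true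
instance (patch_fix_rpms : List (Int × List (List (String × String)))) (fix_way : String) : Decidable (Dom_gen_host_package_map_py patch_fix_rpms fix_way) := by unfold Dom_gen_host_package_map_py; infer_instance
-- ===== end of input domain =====

-- B fuses A's per-host collect-then-reduce (lists of rpms/cves, then sorted()[-1] and sorted(set(..)))
-- into one pass keeping only a running max available_rpm and a cve set per installed_rpm (objective: simpler).


-- ===== PORT A =====
-- rpm[k] : first-match lookup in the rpm dict; total form with default "", used only under
-- Pre_ (which requires the key to be present, since Python raises KeyError otherwise)
def pvLookup (rpm : List (String × String)) (k : String) : String :=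
  (PySem.Dict.mk rpm).getD k ""

-- the body of A's outer loop for one host: build cve_rpm_dict, then reduce each group
def pvHostA (wait_fix_rpm : List (List (String × String))) (fix_way : String) :
    List (List (String × String)) :=
  let cve_rpm_dict : PySem.Dict String (List String × List String) :=
    wait_fix_rpm.foldl (fun d rpm =>
      let inst := pvLookup rpm "installed_rpm"
      let d := if d.contains inst then d else d.insert inst ([], [])
      d.modify inst ([], [])
        (fun p => (p.1 ++ [pvLookup rpm "available_rpm"], p.2 ++ [pvLookup rpm "cve_id"])))
      PySem.Dict.empty
  cve_rpm_dict.items.foldl (fun acc p =>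
    let available_rpm := PySem.List.pyGetD (PySem.List.sorted p.2.1 (fun x => x) false) (-1) ""
    let cves := PySem.Str.join "," (PySem.List.sorted (PySem.Set.ofList p.2.2) (fun x => x) false)
    acc ++ [[("cves", cves), ("available_rpm", available_rpm),
             ("installed_rpm", p.1), ("fix_way", fix_way)]]) []

def gen_host_package_map_py (patch_fix_rpms : List (Int × List (List (String × String)))) (fix_way : String) : List (Int × List (List (String × String))) :=
  (patch_fix_rpms.foldl
    (fun acc p => acc.insert p.1 (pvHostA p.2 fix_way))
    (PySem.Dict.empty : PySem.Dict Int (List (List (String × String))))).items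

-- ===== PORT B =====
-- one pass per host: installed_rpm -> (running max available_rpm, set of cve ids)
def pvHostB (wait_fix_rpm : List (List (String × String))) (fix_way : String) :
    List (List (String × String)) :=
  let agg : PySem.Dict String (String × PySem.Set String) :=
    wait_fix_rpm.foldl (fun d rpm =>
      let inst := pvLookup rpm "installed_rpm"
      match d.get? inst with
      | some e => d.insert inst (max e.1 (pvLookup rpm "available_rpm"),
                                 PySem.Set.add e.2 (pvLookup rpm "cve_id"))
      | none => d.insert inst (pvLookup rpm "available_rpm",
                               PySem.Set.add PySem.Set.empty (pvLookup rpm "cve_id")))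
      PySem.Dict.empty
  agg.items.map (fun p =>
    [("cves", PySem.Str.join "," (PySem.List.sorted p.2.2 (fun x => x) false)),
     ("available_rpm", p.2.1), ("installed_rpm", p.1), ("fix_way", fix_way)])

def gen_host_package_map_py_alt (patch_fix_rpms : List (Int × List (List (String × String)))) (fix_way : String) : List (Int × List (List (String × String))) :=
  patch_fix_rpms.map (fun p => (p.1, pvHostB p.2 fix_way))

-- ===== PRECONDITION & SPEC =====
-- Pre_ excludes (a) rpm dicts missing one of the three keys, on which A raises KeyError, and
-- (b) association lists whose host ids or rpm-dict keys are duplicated — those do not represent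
-- Python dicts (duplicate keys collapse), so behaviour there is an artefact of the encoding.
def Pre_gen_host_package_map_py (patch_fix_rpms : List (Int × List (List (String × String)))) (fix_way : String) : Prop :=
  (patch_fix_rpms.map Prod.fst).Nodup ∧
  ∀ p ∈ patch_fix_rpms, ∀ rpm ∈ p.2,
    (rpm.map Prod.fst).Nodup ∧
    "installed_rpm" ∈ rpm.map Prod.fst ∧
    "available_rpm" ∈ rpm.map Prod.fst ∧
    "cve_id" ∈ rpm.map Prod.fst
instance (patch_fix_rpms : List (Int × List (List (String × String)))) (fix_way : String) : Decidable (Pre_gen_host_package_map_py patch_fix_rpms fix_way) := by unfold Pre_gen_host_package_map_py; infer_instance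

def pvWitness_gen_host_package_map_py : (List (Int × List (List (String × String)))) × String :=
  ([(1, [[("installed_rpm", "kernel-4.19"), ("available_rpm", "kernel-5.1"), ("cve_id", "CVE-2023-123")],
         [("installed_rpm", "kernel-4.19"), ("available_rpm", "kernel-4.20"), ("cve_id", "CVE-2023-1")]])],
   "coldpatch")

def Spec_gen_host_package_map_py (patch_fix_rpms : List (Int × List (List (String × String)))) (fix_way : String) (out : List (Int × List (List (String × String)))) : Prop := out = gen_host_package_map_py_alt patch_fix_rpms fix_way
instance (patch_fix_rpms : List (Int × List (List (String × String)))) (fix_way : String) (out : List (Int × List (List (String × String)))) : Decidable (Spec_gen_host_package_map_py patch_fix_rpms fix_way out) := by unfold Spec_gen_host_package_map_py; infer_instance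

-- ===== CLAIM (what is proved, stated in full; the proofs are below) =====
def Claim_equal_gen_host_package_map_py : Prop := ∀ (patch_fix_rpms : List (Int × List (List (String × String)))) (fix_way : String), Dom_gen_host_package_map_py patch_fix_rpms fix_way → Pre_gen_host_package_map_py patch_fix_rpms fix_way → Spec_gen_host_package_map_py patch_fix_rpms fix_way (gen_host_package_map_py patch_fix_rpms fix_way)

-- ===== LEMMAS AND PROOFS =====

-- an append-accumulating foldl is a map
theorem pv_foldl_emit {A B : Type} (f : A -> B) (l : List A) (acc : List B) :
    l.foldl (fun acc x => acc ++ [f x]) acc = acc ++ l.map f := by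
  induction l generalizing acc with
  | nil => simp
  | cons x t ih => simp [ih]

-- the last element of sorted(x::t) is the running maximum
theorem pv_last_sorted_eq_foldl_max (x : String) (t : List String) :
    PySem.List.pyGetD (PySem.List.sorted (x :: t) (fun y => y) false) (-1) "" =
      t.foldl max x := by
  have hne : PySem.List.sorted (x :: t) (fun y => y) false ≠ [] := by
    simp [PySem.List.sorted_eq_nil_iff]
  rw [PySem.List.pyGetD_neg_one _ _ hne]
  have hperm := PySem.List.sorted_perm (x :: t) (fun y : String => y) false
  have hpw := PySem.List.sorted_pairwise (x :: t) (fun y : String => y)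
  have hlastmem := List.getLast_mem hne
  have hle : ∀ y ∈ PySem.List.sorted (x :: t) (fun y => y) false,
      y ≤ (PySem.List.sorted (x :: t) (fun y => y) false).getLast hne := by
    intro y hy
    have hsplit := List.dropLast_append_getLast hne
    rw [← hsplit] at hpw hy
    rcases List.mem_append.mp hy with hmem | hmem
    · exact ((List.pairwise_append.mp hpw).2.2 y hmem _ (List.mem_singleton_self _))
    · rw [List.mem_singleton.mp hmem]
  have hM := PySem.List.le_foldl_max t x
  have hMmem : t.foldl max x ∈ x :: t := by
    rcases PySem.List.foldl_max_mem t x with hmm | hmm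
    · rw [hmm]; exact List.mem_cons_self
    · exact List.mem_cons_of_mem _ hmm
  have h1 : (PySem.List.sorted (x :: t) (fun y => y) false).getLast hne ≤ t.foldl max x := by
    rcases List.mem_cons.mp (hperm.mem_iff.mp hlastmem) with heq | hmem
    · rw [heq]; exact hM.1
    · exact hM.2 _ hmem
  exact le_antisymm h1 (hle _ (hperm.mem_iff.mpr hMmem))

-- the relation maintained between A's grouping dict and B's aggregate dict
def pvInv (dA : PySem.Dict String (List String × List String))
    (dB : PySem.Dict String (String × PySem.Set String)) : Prop :=
  dA.keys = dB.keys ∧ dA.keys.Nodup ∧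
  ∀ k ∈ dA.keys, ∃ x t, (dA.getD k ([], [])).1 = x :: t ∧
    dB.getD k ("", ([] : PySem.Set String)) =
      (t.foldl max x, PySem.Set.ofList (dA.getD k ([], [])).2)

theorem pv_step_inv (dA : PySem.Dict String (List String × List String))
    (dB : PySem.Dict String (String × PySem.Set String)) (inst a c : String)
    (h : pvInv dA dB) :
    pvInv ((if dA.contains inst then dA else dA.insert inst ([], [])).modify inst ([], [])
             (fun p => (p.1 ++ [a], p.2 ++ [c])))
          (match dB.get? inst with
           | some e => dB.insert inst (max e.1 a, PySem.Set.add e.2 c)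
           | none => dB.insert inst (a, PySem.Set.add PySem.Set.empty c)) := by
  obtain ⟨hkeys, hnd, hval⟩ := h
  by_cases hc : dA.contains inst = true
  · -- key already present
    have hcB : dB.contains inst = true := by
      rw [PySem.Dict.contains_iff_mem_keys] at hc ⊢; rw [← hkeys]; exact hc
    rcases hg : dB.get? inst with _ | e
    · rw [PySem.Dict.get?_eq_none_iff_contains] at hg; rw [hg] at hcB; cases hcB
    have he : dB.getD inst ("", ([] : PySem.Set String)) = e := by
      rw [PySem.Dict.getD_eq_get?_getD, hg]; rfl
    simp only [hc, if_true]
    have hkk : (dA.modify inst ([], []) (fun p => (p.1 ++ [a], p.2 ++ [c]))).keys = dA.keys := by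
      rw [PySem.Dict.keys_modify, PySem.Dict.keys_insert_of_contains _ _ hc]
    refine ⟨?_, ?_, ?_⟩
    · rw [hkk, PySem.Dict.keys_insert_of_contains _ _ hcB, hkeys]
    · rw [hkk]; exact hnd
    · intro k hk
      rw [hkk] at hk
      by_cases hki : k = inst
      · subst hki
        obtain ⟨x, t, hxt, hBv⟩ := hval k hk
        rw [hBv] at he
        refine ⟨x, t ++ [a], ?_, ?_⟩
        · rw [PySem.Dict.getD_modify_self, hxt]; simp
        · rw [PySem.Dict.getD_insert_self, PySem.Dict.getD_modify_self, ← he]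
          simp [List.foldl_append, PySem.Set.ofList_eq_foldl]
      · obtain ⟨x, t, hxt, hBv⟩ := hval k hk
        exact ⟨x, t, by rw [PySem.Dict.getD_modify_of_ne _ _ _ hki]; exact hxt,
          by rw [PySem.Dict.getD_insert_of_ne _ _ _ hki,
                 PySem.Dict.getD_modify_of_ne _ _ _ hki]; exact hBv⟩
  · -- fresh key
    have hc' : dA.contains inst = false := by revert hc; cases dA.contains inst <;> simp
    have hnm : inst ∉ dA.keys := by
      intro hmem; rw [← PySem.Dict.contains_iff_mem_keys] at hmem; rw [hc'] at hmem; cases hmem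
    have hcB : dB.contains inst = false := by
      cases hcb : dB.contains inst
      · rfl
      · rw [PySem.Dict.contains_iff_mem_keys, ← hkeys] at hcb; exact absurd hcb hnm
    have hg : dB.get? inst = none := (PySem.Dict.get?_eq_none_iff_contains _ _).mpr hcB
    simp only [hc', if_false, hg, Bool.false_eq_true]
    have hkk : ((dA.insert inst ([], [])).modify inst ([], [])
        (fun p => (p.1 ++ [a], p.2 ++ [c]))).keys = dA.keys ++ [inst] := by
      rw [PySem.Dict.keys_modify,
          PySem.Dict.keys_insert_of_contains _ _ (PySem.Dict.contains_insert_self _ _ _),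
          PySem.Dict.keys_insert_of_not_contains _ _ hc']
    refine ⟨?_, ?_, ?_⟩
    · rw [hkk, PySem.Dict.keys_insert_of_not_contains _ _ hcB, hkeys]
    · rw [hkk]
      exact hnd.append (List.nodup_singleton _)
        (fun y hy hz => hnm ((List.mem_singleton.mp hz) ▸ hy))
    · intro k hk
      rw [hkk] at hk
      by_cases hki : k = inst
      · subst hki
        refine ⟨a, [], ?_, ?_⟩
        · rw [PySem.Dict.getD_modify_self, PySem.Dict.getD_insert_self]; rfl
        · rw [PySem.Dict.getD_insert_self, PySem.Dict.getD_modify_self,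
              PySem.Dict.getD_insert_self]
          simp [PySem.Set.ofList_eq_foldl, PySem.Set.add, PySem.Set.empty]
      · have hk' : k ∈ dA.keys := by
          rcases List.mem_append.mp hk with hmem | hmem
          · exact hmem
          · exact absurd (List.mem_singleton.mp hmem) hki
        obtain ⟨x, t, hxt, hBv⟩ := hval k hk'
        exact ⟨x, t,
          by rw [PySem.Dict.getD_modify_of_ne _ _ _ hki,
                 PySem.Dict.getD_insert_of_ne _ _ _ hki]; exact hxt,
          by rw [PySem.Dict.getD_insert_of_ne _ _ _ hki,
                 PySem.Dict.getD_modify_of_ne _ _ _ hki,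
                 PySem.Dict.getD_insert_of_ne _ _ _ hki]; exact hBv⟩

theorem pv_fold_inv (l : List (List (String × String))) :
    ∀ dA dB, pvInv dA dB →
    pvInv (l.foldl (fun d rpm =>
            let inst := pvLookup rpm "installed_rpm"
            let d := if d.contains inst then d else d.insert inst ([], [])
            d.modify inst ([], [])
              (fun p => (p.1 ++ [pvLookup rpm "available_rpm"], p.2 ++ [pvLookup rpm "cve_id"]))) dA)
          (l.foldl (fun d rpm =>
            let inst := pvLookup rpm "installed_rpm"
            match d.get? inst with
            | some e => d.insert inst (max e.1 (pvLookup rpm "available_rpm"),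
                                       PySem.Set.add e.2 (pvLookup rpm "cve_id"))
            | none => d.insert inst (pvLookup rpm "available_rpm",
                                     PySem.Set.add PySem.Set.empty (pvLookup rpm "cve_id"))) dB) := by
  induction l with
  | nil => intro dA dB h; exact h
  | cons rpm l ih =>
    intro dA dB h
    simp only [List.foldl_cons]
    exact ih _ _ (pv_step_inv dA dB _ _ _ h)

theorem pv_emit_eq (dA : PySem.Dict String (List String × List String))
    (dB : PySem.Dict String (String × PySem.Set String)) (h : pvInv dA dB) (fw : String) :
    dA.items.foldl (fun acc p => acc ++
      [[("cves", PySem.Str.join "," (PySem.List.sorted (PySem.Set.ofList p.2.2) (fun x => x) false)),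
        ("available_rpm", PySem.List.pyGetD (PySem.List.sorted p.2.1 (fun x => x) false) (-1) ""),
        ("installed_rpm", p.1), ("fix_way", fw)]]) [] =
    dB.items.map (fun p =>
      [("cves", PySem.Str.join "," (PySem.List.sorted p.2.2 (fun x => x) false)),
       ("available_rpm", p.2.1), ("installed_rpm", p.1), ("fix_way", fw)]) := by
  obtain ⟨hkeys, hnd, hval⟩ := h
  rw [pv_foldl_emit, PySem.Dict.items_eq_map_keys dA hnd ([], []),
      PySem.Dict.items_eq_map_keys dB (hkeys ▸ hnd) ("", ([] : PySem.Set String)), ← hkeys,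
      List.map_map, List.map_map, List.nil_append]
  apply List.map_congr_left
  intro k hk
  obtain ⟨x, t, hxt, hBv⟩ := hval k hk
  simp only [Function.comp_apply, hBv, hxt, pv_last_sorted_eq_foldl_max]

theorem pv_host_eq (wait_fix_rpm : List (List (String × String))) (fix_way : String) :
    pvHostA wait_fix_rpm fix_way = pvHostB wait_fix_rpm fix_way :=
  pv_emit_eq _ _ (pv_fold_inv wait_fix_rpm PySem.Dict.empty PySem.Dict.empty
    ⟨by simp [PySem.Dict.keys_empty], by simp [PySem.Dict.keys_empty],
     by intro k hk; simp [PySem.Dict.keys_empty] at hk⟩) fix_way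

-- ===== VERDICT (by name: the statement is the Claim_ definition above) =====
theorem gen_host_package_map_py_spec : Claim_equal_gen_host_package_map_py := by
  intro l fw _dom pre
  unfold Spec_gen_host_package_map_py gen_host_package_map_py gen_host_package_map_py_alt
  rw [PySem.Dict.items_foldl_insert_fresh (k := Prod.fst)
      (v := fun p => pvHostA p.2 fw) (d := PySem.Dict.empty) (l := l)
      (by intro a _; simp [PySem.Dict.contains_empty]) pre.1]
  simp [pv_host_eq, PySem.Dict.empty, PySem.Dict.items]
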